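-- pv_equiv track=rewrite | github.com/thms317/ChromatinMC | zigzagfiber.py | connect_nucs
-- ===== SOURCE A (Python) =====
-- def connect_nucs(N, Nrib, Nstep):
--     '''
--     Creates a sequence of nucleosome ribbon number and height indices
--
--     Parameters
--     ----------
--     N : int
--         Total number of nucleosomes in the fiber
--     Nrib : int
--         Number of ribbons in the fiber
--     Nstep : int
--         Number of steps
--
--     Returns
--     -------
--     nuc_list : list
--         sequence of nucleosome ribbon number and height indices
--     '''
--     i = 0 #ribbon number
--     j = 0 #index in ribbon
--
--     nuc_list = []
--
--     totalnucs = 0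
--     while totalnucs < N:
--
--         if totalnucs % Nrib == 0 and totalnucs != 0:
--             j += 1
--         nuc_list.append([i,j])
--         i = (i + Nstep) % Nrib
--         totalnucs += 1
--
--     return nuc_list
-- ===== SOURCE B (Python) =====
-- def connect_nucs(N, Nrib, Nstep):
--     # nucleosome t sits on ribbon t*Nstep (mod Nrib) at height t // Nrib
--     return [[t * Nstep % Nrib, t // Nrib] for t in range(N)]
-- ===== Notes on version B (the rewrite author's own statement) =====
-- stated objective: idiomatic
-- what changed: Replaces A's while loop with three running accumulators (ribbon i, height j with a conditional increment, counter) by a single list comprehension computing each pair in closed form from its index t (ribbon = t*Nstep % Nrib, height = t // Nrib); Pre_ restricts Nrib to positive values (the natural domain for a ribbon count) — Nrib = 0 makes A raise ZeroDivisionError, and for negative Nrib A's height index is an accident of Python's sign-following %.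
-- outside the precondition, e.g. on connect_nucs(3, -2, 1): A returns [[0, 0], [-1, 0], [0, 1]], B returns [[0, 0], [-1, -1], [0, -1]]
import Mathlib
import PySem

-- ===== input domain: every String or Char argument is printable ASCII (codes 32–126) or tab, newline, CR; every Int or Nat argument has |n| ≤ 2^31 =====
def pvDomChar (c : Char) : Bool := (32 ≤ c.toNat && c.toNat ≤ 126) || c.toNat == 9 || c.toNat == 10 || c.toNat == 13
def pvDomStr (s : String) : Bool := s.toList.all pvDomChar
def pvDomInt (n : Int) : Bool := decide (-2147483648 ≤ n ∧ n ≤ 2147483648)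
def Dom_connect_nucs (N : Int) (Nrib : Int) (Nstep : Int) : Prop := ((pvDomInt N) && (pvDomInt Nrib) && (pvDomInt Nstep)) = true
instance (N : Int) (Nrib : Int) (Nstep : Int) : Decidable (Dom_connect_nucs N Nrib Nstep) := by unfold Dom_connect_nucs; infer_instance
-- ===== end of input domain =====

-- B replaces A's while loop with three running accumulators by a single comprehension
-- computing each pair in closed form from its index t; objective: idiomatic.


-- ===== PORT A =====
-- the while loop: fuel = number of remaining iterations; state (i, j, totalnucs)
def connectNucsLoopA (Nrib Nstep : Int) : Nat → Int → Int → Int → List (List Int)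
  | 0, _, _, _ => []
  | fuel + 1, i, j, t =>
      let j' := if PySem.Int.mod t Nrib = 0 ∧ t ≠ 0 then j + 1 else j
      [i, j'] :: connectNucsLoopA Nrib Nstep fuel (PySem.Int.mod (i + Nstep) Nrib) j' (t + 1)

def connect_nucs (N : Int) (Nrib : Int) (Nstep : Int) : List (List Int) :=
  connectNucsLoopA Nrib Nstep N.toNat 0 0 0

-- ===== PORT B =====
-- the comprehension: map over range(N)
def connect_nucs_alt (N : Int) (Nrib : Int) (Nstep : Int) : List (List Int) :=
  (PySem.List.pyRange 0 N 1).map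
    (fun t => [PySem.Int.mod (t * Nstep) Nrib, PySem.Int.floordiv t Nrib])

-- ===== PRECONDITION & SPEC =====
-- Pre_ restricts the ribbon count Nrib to positive values, the function's natural domain:
-- Nrib = 0 makes A raise ZeroDivisionError (when N > 0), and negative Nrib lies outside the
-- task's natural domain (A's height index there is an accident of Python's sign-following %).
def Pre_connect_nucs (N : Int) (Nrib : Int) (Nstep : Int) : Prop := N ≤ 0 ∨ 1 ≤ Nrib
instance (N : Int) (Nrib : Int) (Nstep : Int) : Decidable (Pre_connect_nucs N Nrib Nstep) := by
  unfold Pre_connect_nucs; infer_instance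
def pvWitness_connect_nucs : Int × Int × Int := (7, 3, 2)

def Spec_connect_nucs (N : Int) (Nrib : Int) (Nstep : Int) (out : List (List Int)) : Prop := out = connect_nucs_alt N Nrib Nstep
instance (N : Int) (Nrib : Int) (Nstep : Int) (out : List (List Int)) : Decidable (Spec_connect_nucs N Nrib Nstep out) := by unfold Spec_connect_nucs; infer_instance

-- ===== CLAIM (what is proved, stated in full; the proofs are below) =====
def Claim_equal_connect_nucs : Prop := ∀ (N : Int) (Nrib : Int) (Nstep : Int), Dom_connect_nucs N Nrib Nstep → Pre_connect_nucs N Nrib Nstep → Spec_connect_nucs N Nrib Nstep (connect_nucs N Nrib Nstep)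

-- ===== LEMMAS AND PROOFS =====

-- floor division steps by one when crossing a multiple of the (positive) divisor …
lemma fdiv_pred_add_one (t m : Int) (hm : 0 < m) (hd : m ∣ t) :
    (t - 1).fdiv m + 1 = t.fdiv m := by
  obtain ⟨k, rfl⟩ := hd
  rw [Int.fdiv_eq_ediv, Int.fdiv_eq_ediv]
  rw [if_pos (Or.inl hm.le), if_pos (Or.inl hm.le)]
  rw [Int.mul_ediv_cancel_left _ (show m ≠ 0 by omega)]
  have h1 : m * k - 1 = (m - 1) + m * (k - 1) := by ring
  rw [h1, Int.add_mul_ediv_left _ _ (show m ≠ 0 by omega)]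
  rw [Int.ediv_eq_zero_of_lt (by omega) (by omega)]
  ring

-- … and is constant between multiples
lemma fdiv_pred_eq (t m : Int) (hm : 0 < m) (hd : ¬ m ∣ t) :
    (t - 1).fdiv m = t.fdiv m := by
  rw [Int.fdiv_eq_ediv, Int.fdiv_eq_ediv]
  rw [if_pos (Or.inl hm.le), if_pos (Or.inl hm.le)]
  have h := Int.emod_add_mul_ediv t m
  have h2 := Int.emod_nonneg t (show m ≠ 0 by omega)
  have h3 := Int.emod_lt_of_pos t hm
  have hr : t % m ≠ 0 := fun h0 => hd (Int.dvd_of_emod_eq_zero h0)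
  have h4 : t - 1 = (t % m - 1) + m * (t / m) := by omega
  rw [h4, Int.add_mul_ediv_left _ _ (show m ≠ 0 by omega),
    Int.ediv_eq_zero_of_lt (by omega) (by omega)]
  ring

-- A's conditionally incremented j, updated at index t, equals B's closed form t // Nrib
lemma j_step (Nrib t j : Int) (hR : 1 ≤ Nrib)
    (hj : (t = 0 ∧ j = 0) ∨ (1 ≤ t ∧ j = PySem.Int.floordiv (t - 1) Nrib)) :
    (if PySem.Int.mod t Nrib = 0 ∧ t ≠ 0 then j + 1 else j) = PySem.Int.floordiv t Nrib := by
  have hm : (0 : Int) < Nrib := by omega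
  rcases hj with ⟨rfl, rfl⟩ | ⟨ht, rfl⟩
  · simp [PySem.Int.floordiv, Int.zero_fdiv]
  · simp only [PySem.Int.mod_eq_zero_iff_dvd]
    by_cases hd : Nrib ∣ t
    · rw [if_pos ⟨hd, by omega⟩]
      exact fdiv_pred_add_one t Nrib hm hd
    · rw [if_neg (by tauto)]
      exact fdiv_pred_eq t Nrib hm hd

-- A's loop, run for 'fuel' more steps from counter t, produces the closed-form pairs
-- for indices t, t+1, …, t+fuel-1
lemma loopA_eq_map (Nrib Nstep : Int) (hR : 1 ≤ Nrib) :
    ∀ (fuel : Nat) (t i j : Int),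
      i = PySem.Int.mod (t * Nstep) Nrib →
      ((t = 0 ∧ j = 0) ∨ (1 ≤ t ∧ j = PySem.Int.floordiv (t - 1) Nrib)) →
      connectNucsLoopA Nrib Nstep fuel i j t =
        (List.range fuel).map
          (fun (k : Nat) => [PySem.Int.mod ((t + (k : Int)) * Nstep) Nrib,
            PySem.Int.floordiv (t + (k : Int)) Nrib]) := by
  intro fuel
  induction fuel with
  | zero => intro t i j _ _; rfl
  | succ n ih =>
      intro t i j hi hj
      have hj' := j_step Nrib t j hR hj
      rw [List.range_succ_eq_map, List.map_cons, List.map_map]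
      simp only [connectNucsLoopA, hj', hi]
      refine congrArg₂ List.cons (by simp) ?_
      rw [ih (t + 1) _ _ ?_ (Or.inr ⟨by rcases hj with ⟨rfl, _⟩ | ⟨h, _⟩ <;> omega, by simp⟩)]
      · apply List.map_congr_left
        intro k _
        have h1 : t + 1 + (k : Int) = t + ((k : Int) + 1) := by ring
        simp [Function.comp, Nat.succ_eq_add_one, h1]
      · show PySem.Int.mod (PySem.Int.mod (t * Nstep) Nrib + Nstep) Nrib
            = PySem.Int.mod ((t + 1) * Nstep) Nrib
        simp only [PySem.Int.mod]
        rw [Int.fmod_add_fmod]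
        ring_nf

-- ===== VERDICT (by name: the statement is the Claim_ definition above) =====
theorem connect_nucs_spec : Claim_equal_connect_nucs := by
  intro N Nrib Nstep _ hpre
  unfold Spec_connect_nucs connect_nucs connect_nucs_alt
  rcases hpre with hN | hR
  · have h0 : N.toNat = 0 := by omega
    rw [h0, PySem.List.pyRange_one_eq_nil (by omega)]
    rfl
  · rw [PySem.List.pyRange_one, List.map_map,
      loopA_eq_map Nrib Nstep hR N.toNat 0 0 0
        (by simp [PySem.Int.mod, Int.zero_fmod]) (Or.inl ⟨rfl, rfl⟩)]
    simp [Function.comp]
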